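-- pv_equiv track=rewrite | github.com/akshaygopalkr/ECE-143-Final-Project | Code-and-Notebooks/most_common_names.py | merge_fake_names
-- ===== SOURCE A (Python) =====
-- def merge_fake_names(fake_name):
--     """
--     Merges common names in Fake news
--     into one category
--     :param fake_name: The most common names in fake news
--     :return: The filtered names in fake news
--     """
--     fake_name = ['Donald Trump' if (name == 'Mr. Trump' or name == 'Trump' or name == 'Donald J. Trump')
--                  else name for name in fake_name]
--     fake_name = ['Barack Obama' if (name == 'Obama' or name == 'Mr. Obama')
--                  else name for name in fake_name]
--     fake_name = ['Clinton' if name == 'Hillary' or name == 'Hillary Clinton' or name == 'Bill' or name == 'Bill Clinton'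
--                               or name == 'Clintons' else name for name in fake_name]
--     return fake_name
-- ===== SOURCE B (Python) =====
-- CANON = {
--     'Mr. Trump': 'Donald Trump', 'Trump': 'Donald Trump', 'Donald J. Trump': 'Donald Trump',
--     'Obama': 'Barack Obama', 'Mr. Obama': 'Barack Obama',
--     'Hillary': 'Clinton', 'Hillary Clinton': 'Clinton', 'Bill': 'Clinton',
--     'Bill Clinton': 'Clinton', 'Clintons': 'Clinton',
-- }
--
-- def merge_fake_names(fake_name):
--     return [CANON.get(name, name) for name in fake_name]
-- ===== Notes on version B (the rewrite author's own statement) =====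
-- stated objective: simpler
-- what changed: Replaces three sequential whole-list rewriting passes (one per person, each a chain of equality tests) with one canonicalisation dict covering all variants and a single table-driven pass returning CANON.get(name, name).
import Mathlib
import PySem

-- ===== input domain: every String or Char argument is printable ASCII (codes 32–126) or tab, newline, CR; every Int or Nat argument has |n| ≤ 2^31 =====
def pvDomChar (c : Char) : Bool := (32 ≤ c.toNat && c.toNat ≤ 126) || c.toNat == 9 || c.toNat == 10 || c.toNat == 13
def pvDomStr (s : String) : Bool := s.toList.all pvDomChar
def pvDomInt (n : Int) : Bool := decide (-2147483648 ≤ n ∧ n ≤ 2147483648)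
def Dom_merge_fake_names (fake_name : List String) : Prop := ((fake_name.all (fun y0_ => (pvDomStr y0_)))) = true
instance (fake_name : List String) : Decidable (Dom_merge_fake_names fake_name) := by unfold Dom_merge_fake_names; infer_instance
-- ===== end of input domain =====

-- B replaces A's three sequential whole-list passes with one canonicalisation dict and a single pass (simpler).

-- ===== PORT A =====
-- the three per-element rewrites of A's three list comprehensions, in order
def trumpStep (name : String) : String :=
  if name = "Mr. Trump" ∨ name = "Trump" ∨ name = "Donald J. Trump" then "Donald Trump" else name
def obamaStep (name : String) : String :=
  if name = "Obama" ∨ name = "Mr. Obama" then "Barack Obama" else name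
def clintonStep (name : String) : String :=
  if name = "Hillary" ∨ name = "Hillary Clinton" ∨ name = "Bill" ∨ name = "Bill Clinton" ∨ name = "Clintons"
  then "Clinton" else name

def merge_fake_names (fake_name : List String) : List String :=
  let fake_name := fake_name.map trumpStep
  let fake_name := fake_name.map obamaStep
  let fake_name := fake_name.map clintonStep
  fake_name

-- ===== PORT B =====
def CANON : PySem.Dict String String :=
  PySem.Dict.ofList
    [("Mr. Trump", "Donald Trump"), ("Trump", "Donald Trump"), ("Donald J. Trump", "Donald Trump"),
     ("Obama", "Barack Obama"), ("Mr. Obama", "Barack Obama"),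
     ("Hillary", "Clinton"), ("Hillary Clinton", "Clinton"), ("Bill", "Clinton"),
     ("Bill Clinton", "Clinton"), ("Clintons", "Clinton")]

def merge_fake_names_alt (fake_name : List String) : List String :=
  fake_name.map (fun name => CANON.getD name name)

-- ===== PRECONDITION & SPEC =====
def Spec_merge_fake_names (fake_name : List String) (out : List String) : Prop := out = merge_fake_names_alt fake_name
instance (fake_name : List String) (out : List String) : Decidable (Spec_merge_fake_names fake_name out) := by unfold Spec_merge_fake_names; infer_instance

-- ===== CLAIM (what is proved, stated in full; the proofs are below) =====
def Claim_equal_merge_fake_names : Prop := ∀ (fake_name : List String), Dom_merge_fake_names fake_name → Spec_merge_fake_names fake_name (merge_fake_names fake_name)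

-- ===== LEMMAS AND PROOFS =====

theorem merge_pointwise (name : String) :
    clintonStep (obamaStep (trumpStep name)) = CANON.getD name name := by
  by_cases h1 : name = "Mr. Trump"
  · subst h1; decide
  by_cases h2 : name = "Trump"
  · subst h2; decide
  by_cases h3 : name = "Donald J. Trump"
  · subst h3; decide
  by_cases h4 : name = "Obama"
  · subst h4; decide
  by_cases h5 : name = "Mr. Obama"
  · subst h5; decide
  by_cases h6 : name = "Hillary"
  · subst h6; decide
  by_cases h7 : name = "Hillary Clinton"
  · subst h7; decide
  by_cases h8 : name = "Bill"
  · subst h8; decide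
  by_cases h9 : name = "Bill Clinton"
  · subst h9; decide
  by_cases h10 : name = "Clintons"
  · subst h10; decide
  · have e : CANON = PySem.Dict.mk
        [("Mr. Trump", "Donald Trump"), ("Trump", "Donald Trump"), ("Donald J. Trump", "Donald Trump"),
         ("Obama", "Barack Obama"), ("Mr. Obama", "Barack Obama"),
         ("Hillary", "Clinton"), ("Hillary Clinton", "Clinton"), ("Bill", "Clinton"),
         ("Bill Clinton", "Clinton"), ("Clintons", "Clinton")] := rfl
    rw [e]
    simp [trumpStep, obamaStep, clintonStep, PySem.Dict.getD, PySem.Dict.get?,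
      h1, h2, h3, h4, h5, h6, h7, h8, h9, h10,
      Ne.symm h1, Ne.symm h2, Ne.symm h3, Ne.symm h4, Ne.symm h5,
      Ne.symm h6, Ne.symm h7, Ne.symm h8, Ne.symm h9, Ne.symm h10]

-- ===== VERDICT (by name: the statement is the Claim_ definition above) =====
theorem merge_fake_names_spec : Claim_equal_merge_fake_names := by
  intro fake_name _
  unfold Spec_merge_fake_names merge_fake_names merge_fake_names_alt
  simp only [List.map_map, List.map_inj_left, Function.comp]
  intro name _
  exact merge_pointwise name
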